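-- pv_equiv track=rewrite | github.com/batamorphism/Coding | Python/AtCoder/old/abc218_c_0102.py | check
-- ===== SOURCE A (Python) =====
-- def check(S_set: set, T_set: set) -> bool:
--     # S_setとT_setが平行移動させて同じかどうか
--     # これは、Sの要素を平行移動させたものがTに含まれているかどうかで判定する
--     base_point = list(S_set)[0]
--     for t_point in T_set:
--         diff_r = t_point[0] - base_point[0]
--         diff_c = t_point[1] - base_point[1]
--         is_subset = True
--         for s_point in S_set:
--             offset_point = (s_point[0] + diff_r, s_point[1] + diff_c)
--             if offset_point not in T_set:
--                 is_subset = False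
--                 break
--         if is_subset:
--             return True
--     return False
-- ===== SOURCE B (Python) =====
-- def check(S_set: set, T_set: set) -> bool:
--     # Pair-counting: for each difference vector d = t - s over the cross
--     # product T x S, count how many (t, s) pairs realize it; d is a valid
--     # translation of S into T exactly when its count equals |S|.
--     counts = {}
--     for t_point in T_set:
--         for s_point in S_set:
--             d = (t_point[0] - s_point[0], t_point[1] - s_point[1])
--             counts[d] = counts.get(d, 0) + 1
--     return len(S_set) in counts.values()
-- ===== Notes on version B (the rewrite author's own statement) =====
-- stated objective: alternative
-- what changed: B drops A's try-each-anchor subset test (for each t in T, check membership of every shifted s with early exit) and instead builds one counting dict over the T x S cross product of difference vectors, returning whether any vector is realized by exactly |S| pairs; no membership tests against T remain.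
import Mathlib
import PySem

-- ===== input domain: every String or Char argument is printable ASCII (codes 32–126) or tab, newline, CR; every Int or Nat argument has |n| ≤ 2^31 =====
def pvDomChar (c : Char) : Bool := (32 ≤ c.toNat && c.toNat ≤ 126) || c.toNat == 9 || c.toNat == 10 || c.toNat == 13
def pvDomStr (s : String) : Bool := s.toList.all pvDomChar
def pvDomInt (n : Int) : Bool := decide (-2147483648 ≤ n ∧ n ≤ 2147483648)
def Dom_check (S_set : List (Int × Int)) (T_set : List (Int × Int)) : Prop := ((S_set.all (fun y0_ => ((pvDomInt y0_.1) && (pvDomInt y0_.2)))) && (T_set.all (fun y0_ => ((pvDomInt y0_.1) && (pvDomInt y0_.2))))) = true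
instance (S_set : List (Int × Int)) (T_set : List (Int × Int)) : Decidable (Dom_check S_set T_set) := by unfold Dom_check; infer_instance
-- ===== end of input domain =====

-- B replaces A's try-each-anchor nested subset test by one counting dict over the
-- T × S cross product of difference vectors; same cost, different algorithm.

-- ===== PORT A =====
-- for each t in T: is S shifted by (t - base) a subset of T? early-return on success
def check (S_set : List (Int × Int)) (T_set : List (Int × Int)) : Bool :=
  match S_set with
  | [] => false   -- Python raises IndexError here; excluded by Pre_check
  | base_point :: _ =>
    T_set.any (fun t_point =>
      let diff_r := t_point.1 - base_point.1
      let diff_c := t_point.2 - base_point.2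
      S_set.all (fun s_point =>
        PySem.Set.contains T_set (s_point.1 + diff_r, s_point.2 + diff_c)))

-- ===== PORT B =====
-- counts[d] = number of pairs (t, s) in T × S with t - s = d;
-- some d is a valid translation iff its count is len(S)
def check_alt (S_set : List (Int × Int)) (T_set : List (Int × Int)) : Bool :=
  let counts : PySem.Dict (Int × Int) Int :=
    T_set.foldl (fun c t_point =>
      S_set.foldl (fun c s_point =>
        let d := (t_point.1 - s_point.1, t_point.2 - s_point.2)
        c.insert d (c.getD d 0 + 1)) c)
      PySem.Dict.empty
  counts.values.contains (S_set.length : Int)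

-- ===== PRECONDITION & SPEC =====
-- Pre_ excludes only empty S_set (Python A raises IndexError at list(S_set)[0]);
-- T_set.Nodup is the set-representation invariant (a Python 'set' argument always
-- holds distinct elements), not a narrowing of A's domain.
def Pre_check (S_set : List (Int × Int)) (T_set : List (Int × Int)) : Prop := S_set ≠ [] ∧ T_set.Nodup
instance (S_set : List (Int × Int)) (T_set : List (Int × Int)) : Decidable (Pre_check S_set T_set) := by unfold Pre_check; infer_instance
def pvWitness_check : (List (Int × Int)) × (List (Int × Int)) := ([(0, 0), (1, 2)], [(3, 3), (4, 5)])

def Spec_check (S_set : List (Int × Int)) (T_set : List (Int × Int)) (out : Bool) : Prop := out = check_alt S_set T_set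
instance (S_set : List (Int × Int)) (T_set : List (Int × Int)) (out : Bool) : Decidable (Spec_check S_set T_set out) := by unfold Spec_check; infer_instance

-- ===== CLAIM (what is proved, stated in full; the proofs are below) =====
def Claim_equal_check : Prop := ∀ (S_set : List (Int × Int)) (T_set : List (Int × Int)), Dom_check S_set T_set → Pre_check S_set T_set → Spec_check S_set T_set (check S_set T_set)

-- ===== LEMMAS AND PROOFS =====

-- the cross-product list of difference vectors B counts over (proof-only helper)
def diffsList (S_set : List (Int × Int)) (T_set : List (Int × Int)) : List (Int × Int) :=
  T_set.flatMap (fun t => S_set.map (fun s => (t.1 - s.1, t.2 - s.2)))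

-- B's nested counting loops are the Counter of the flattened cross product
theorem nested_fold_eq_counter (S T : List (Int × Int)) :
    (T.foldl (fun c t_point =>
        S.foldl (fun c s_point =>
          let d := (t_point.1 - s_point.1, t_point.2 - s_point.2)
          c.insert d (c.getD d 0 + 1)) c)
      PySem.Dict.empty)
    = PySem.Dict.counter (diffsList S T) := by
  rw [← PySem.Dict.foldl_insert_getD_add_one_eq_counter]
  unfold diffsList
  generalize (PySem.Dict.empty : PySem.Dict (Int × Int) Int) = init
  induction T generalizing init with
  | nil => rfl
  | cons t T ih =>
    simp only [List.foldl_cons, List.flatMap_cons, List.foldl_append, ih, List.foldl_map]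

-- count of a pair appearing in a flatMap is the sum of the blocks' counts
theorem count_flatMap (T : List (Int × Int)) (f : (Int × Int) → List (Int × Int)) (d : Int × Int) :
    (T.flatMap f).count d = (T.map (fun t => (f t).count d)).sum := by
  induction T with
  | nil => simp
  | cons t T ih => simp [List.count_append, ih]

-- indicator split of countP over a disjoint disjunction
theorem countP_or_disjoint {α : Type} (p q : α → Bool) (l : List α)
    (h : ∀ a ∈ l, ¬(p a = true ∧ q a = true)) :
    l.countP (fun a => p a || q a) = l.countP p + l.countP q := by
  induction l with
  | nil => simp
  | cons a l ih =>
    simp only [List.countP_cons]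
    rw [ih (fun a ha => h a (List.mem_cons_of_mem _ ha))]
    have := h a (List.mem_cons_self)
    by_cases hp : p a = true <;> by_cases hq : q a = true <;> simp [hp, hq] at * <;> omega

-- the key exchange: for a duplicate-free T, the number of (t, s) pairs with
-- t - s = d equals the number of s ∈ S with s + d ∈ T
theorem count_diffs (S T : List (Int × Int)) (d : Int × Int) (hT : T.Nodup) :
    (diffsList S T).count d = S.countP (fun s => decide ((s.1 + d.1, s.2 + d.2) ∈ T)) := by
  unfold diffsList
  rw [count_flatMap]
  induction T with
  | nil => simp
  | cons t T ih =>
    rw [List.nodup_cons] at hT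
    simp only [List.map_cons, List.sum_cons, ih hT.2]
    have h1 : (S.map (fun s => (t.1 - s.1, t.2 - s.2))).count d
        = S.countP (fun s => decide ((s.1 + d.1, s.2 + d.2) = t)) := by
      simp only [List.count, List.countP_map]
      apply List.countP_congr
      intro s _
      simp only [Function.comp, beq_iff_eq, decide_eq_true_eq, Prod.ext_iff]
      constructor <;> (intro ⟨h1, h2⟩; constructor <;> omega)
    rw [h1]
    have h2 : S.countP (fun s => decide ((s.1 + d.1, s.2 + d.2) ∈ t :: T))
        = S.countP (fun s => decide ((s.1 + d.1, s.2 + d.2) = t) ||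
                             decide ((s.1 + d.1, s.2 + d.2) ∈ T)) := by
      apply List.countP_congr; intro s _; simp [List.mem_cons]
    have hdisj : ∀ s ∈ S, ¬((decide ((s.1 + d.1, s.2 + d.2) = t)) = true ∧
        (decide ((s.1 + d.1, s.2 + d.2) ∈ T)) = true) := by
      intro s _ ⟨hp, hq⟩
      simp only [decide_eq_true_eq] at hp hq
      exact hT.1 (hp ▸ hq)
    rw [h2, countP_or_disjoint _ _ _ hdisj]

-- ===== VERDICT (by name: the statement is the Claim_ definition above) =====
theorem check_spec : Claim_equal_check := by
  intro S T _hdom hpre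
  obtain ⟨hS, hT⟩ := hpre
  unfold Spec_check
  match S, hS with
  | b :: rest, _ =>
    apply Bool.eq_iff_iff.mpr
    show (check (b :: rest) T) = true ↔ (check_alt (b :: rest) T) = true
    rw [check, check_alt]
    simp only [nested_fold_eq_counter, PySem.Dict.values, PySem.Dict.items_counter,
      List.contains_iff_mem, List.map_map, List.mem_map, List.any_eq_true, List.all_eq_true,
      PySem.Set.contains, List.contains_iff_mem]
    constructor
    · rintro ⟨t, ht, hall⟩
      refine ⟨(t.1 - b.1, t.2 - b.2), (PySem.Set.mem_ofList _ _).mpr ?_, ?_⟩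
      · unfold diffsList
        refine List.mem_flatMap.mpr ⟨t, ht, List.mem_map.mpr ⟨b, List.mem_cons_self, rfl⟩⟩
      · simp only [Function.comp]
        rw [count_diffs _ _ _ hT]
        congr 1
        exact List.countP_eq_length.mpr (fun s hs => decide_eq_true (hall s hs))
    · rintro ⟨d, hd, hcnt⟩
      simp only [Function.comp] at hcnt
      rw [count_diffs _ _ _ hT] at hcnt
      have hall : ∀ s ∈ b :: rest, (s.1 + d.1, s.2 + d.2) ∈ T := by
        intro s hs
        have := List.countP_eq_length.mp (by exact_mod_cast hcnt) s hs
        exact of_decide_eq_true this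
      have hbT : (b.1 + d.1, b.2 + d.2) ∈ T := hall b List.mem_cons_self
      refine ⟨(b.1 + d.1, b.2 + d.2), hbT, fun s hs => ?_⟩
      have := hall s hs
      simpa using this
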